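-- pv_equiv track=rewrite | github.com/saemscodes/Nasaka-IEBC | scripts/data-pipeline/pipeline.py | _extract_from_text
-- ===== SOURCE A (Python) =====
-- from typing import Dict, List, Optional, Tuple
--
-- KENYAN_COUNTIES = [
--     "Baringo", "Bomet", "Bungoma", "Busia", "Elgeyo-Marakwet", "Embu",
--     "Garissa", "Homa Bay", "Isiolo", "Kajiado", "Kakamega", "Kericho",
--     "Kiambu", "Kilifi", "Kirinyaga", "Kisii", "Kisumu", "Kitui",
--     "Kwale", "Laikipia", "Lamu", "Machakos", "Makueni", "Mandera",
--     "Marsabit", "Meru", "Migori", "Mombasa", "Murang'a", "Nairobi",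
--     "Nakuru", "Nandi", "Narok", "Nyamira", "Nyandarua", "Nyeri",
--     "Samburu", "Siaya", "Taita-Taveta", "Tana River", "Tharaka-Nithi",
--     "Trans Nzoia", "Turkana", "Uasin Gishu", "Vihiga", "Wajir", "West Pokot"
-- ]
--
-- def _extract_from_text(text: str) -> List[Dict]:
--     """Extract offices from unstructured text"""
--     offices = []
--     lines = text.split('\n')
--
--     current_office = {}
--     for line in lines:
--         line = line.strip()
--         if not line:
--             continue
--
--         if any(county.lower() in line.lower() for county in KENYAN_COUNTIES):
--             if current_office:
--                 offices.append(current_office)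
--             current_office = {'county': line}
--         elif 'constituency' in line.lower():
--             current_office['constituency_name'] = line
--             current_office['constituency'] = line
--         elif len(line) > 10:
--             if 'office_location' not in current_office:
--                 current_office['office_location'] = line
--             elif 'landmark' not in current_office:
--                 current_office['landmark'] = line
--
--     if current_office:
--         offices.append(current_office)
--
--     return offices
-- ===== SOURCE B (Python) =====
-- from typing import Dict, List
--
-- KENYAN_COUNTIES = [
--     "Baringo", "Bomet", "Bungoma", "Busia", "Elgeyo-Marakwet", "Embu",
--     "Garissa", "Homa Bay", "Isiolo", "Kajiado", "Kakamega", "Kericho",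
--     "Kiambu", "Kilifi", "Kirinyaga", "Kisii", "Kisumu", "Kitui",
--     "Kwale", "Laikipia", "Lamu", "Machakos", "Makueni", "Mandera",
--     "Marsabit", "Meru", "Migori", "Mombasa", "Murang'a", "Nairobi",
--     "Nakuru", "Nandi", "Narok", "Nyamira", "Nyandarua", "Nyeri",
--     "Samburu", "Siaya", "Taita-Taveta", "Tana River", "Tharaka-Nithi",
--     "Trans Nzoia", "Turkana", "Uasin Gishu", "Vihiga", "Wajir", "West Pokot"
-- ]
--
-- _COUNTIES_LOWER = [c.lower() for c in KENYAN_COUNTIES]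
--
--
-- def _is_county_line(line: str) -> bool:
--     low = line.lower()
--     return any(c in low for c in _COUNTIES_LOWER)
--
--
-- def _build(init: Dict, body: List[str]) -> Dict:
--     d = dict(init)
--     for line in body:
--         if 'constituency' in line.lower():
--             d['constituency_name'] = line
--             d['constituency'] = line
--         elif len(line) > 10:
--             if 'office_location' not in d:
--                 d['office_location'] = line
--             elif 'landmark' not in d:
--                 d['landmark'] = line
--     return d
--
--
-- def _extract_from_text(text: str) -> List[Dict]:
--     cleaned = [s for s in (ln.strip() for ln in text.split('\n')) if s]
--     # Split into segments at county-header lines, scanning from the back.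
--     body: List[str] = []
--     segs: List = []
--     for line in reversed(cleaned):
--         if _is_county_line(line):
--             body.reverse()
--             segs.append((line, body))
--             body = []
--         else:
--             body.append(line)
--     body.reverse()
--     segs.reverse()
--     lead = body
--     offices = []
--     d0 = _build({}, lead)
--     if d0:
--         offices.append(d0)
--     offices.extend(_build({'county': h}, b) for h, b in segs)
--     return offices
-- ===== Notes on version B (the rewrite author's own statement) =====
-- stated objective: alternative
-- what changed: A threads one mutable current-office dict through a single stateful loop with emit-on-next-county; B first partitions the cleaned lines into county-headed segments (plus a leading county-less segment) with a backward scan and then builds each office dict independently from its own segment.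
import Mathlib
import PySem

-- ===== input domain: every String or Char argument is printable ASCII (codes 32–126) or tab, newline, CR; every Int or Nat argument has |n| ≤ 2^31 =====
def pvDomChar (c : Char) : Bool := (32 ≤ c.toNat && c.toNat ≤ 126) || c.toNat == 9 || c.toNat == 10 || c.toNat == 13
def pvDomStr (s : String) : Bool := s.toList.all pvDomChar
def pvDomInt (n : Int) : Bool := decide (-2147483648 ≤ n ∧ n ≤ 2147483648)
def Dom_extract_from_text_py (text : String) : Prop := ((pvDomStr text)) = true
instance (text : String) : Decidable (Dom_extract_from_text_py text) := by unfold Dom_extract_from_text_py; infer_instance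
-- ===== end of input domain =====

-- B re-decomposes A's single stateful loop: split the cleaned lines into county-headed
-- segments, then build each office dict independently (objective: alternative decomposition).

def kenyanCounties : List String :=
  ["Baringo", "Bomet", "Bungoma", "Busia", "Elgeyo-Marakwet", "Embu",
   "Garissa", "Homa Bay", "Isiolo", "Kajiado", "Kakamega", "Kericho",
   "Kiambu", "Kilifi", "Kirinyaga", "Kisii", "Kisumu", "Kitui",
   "Kwale", "Laikipia", "Lamu", "Machakos", "Makueni", "Mandera",
   "Marsabit", "Meru", "Migori", "Mombasa", "Murang'a", "Nairobi",
   "Nakuru", "Nandi", "Narok", "Nyamira", "Nyandarua", "Nyeri",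
   "Samburu", "Siaya", "Taita-Taveta", "Tana River", "Tharaka-Nithi",
   "Trans Nzoia", "Turkana", "Uasin Gishu", "Vihiga", "Wajir", "West Pokot"]

-- ===== PORT A =====
-- A's loop body, named (strip, skip blanks, then the three elif branches in A's order)
def stepA (st : List (List (String × String)) × PySem.Dict String String) (line : String) :
    List (List (String × String)) × PySem.Dict String String :=
  let line := PySem.Str.strip line
  if line = "" then st
  else if kenyanCounties.any
      (fun county => PySem.Str.isIn (PySem.Str.lower county) (PySem.Str.lower line)) then
    ((if st.2.items = [] then st.1 else st.1 ++ [st.2.items]),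
     PySem.Dict.insert PySem.Dict.empty "county" line)
  else if PySem.Str.isIn "constituency" (PySem.Str.lower line) then
    (st.1, PySem.Dict.insert (PySem.Dict.insert st.2 "constituency_name" line) "constituency" line)
  else if PySem.Str.len line > 10 then
    (st.1,
     if st.2.contains "office_location" = false then PySem.Dict.insert st.2 "office_location" line
     else if st.2.contains "landmark" = false then PySem.Dict.insert st.2 "landmark" line
     else st.2)
  else st

def extract_from_text_py (text : String) : List (List (String × String)) :=
  let res := ((PySem.Str.split? text "\n").getD []).foldl stepA ([], PySem.Dict.empty)
  if res.2.items = [] then res.1 else res.1 ++ [res.2.items]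

-- ===== PORT B =====
def isCountyLine (line : String) : Bool :=
  let low := PySem.Str.lower line
  (kenyanCounties.map PySem.Str.lower).any (fun c => PySem.Str.isIn c low)

-- Source B's _build loop body
def stepB (d : PySem.Dict String String) (line : String) : PySem.Dict String String :=
  if PySem.Str.isIn "constituency" (PySem.Str.lower line) then
    PySem.Dict.insert (PySem.Dict.insert d "constituency_name" line) "constituency" line
  else if PySem.Str.len line > 10 then
    if d.contains "office_location" = false then PySem.Dict.insert d "office_location" line
    else if d.contains "landmark" = false then PySem.Dict.insert d "landmark" line
    else d
  else d

def buildOffice (init : PySem.Dict String String) (body : List String) : PySem.Dict String String :=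
  body.foldl stepB init

-- the backward segmentation loop of Source B, as the corresponding structural recursion (foldr)
def splitSegs : List String → List String × List (String × List String)
  | [] => ([], [])
  | l :: ls =>
    let r := splitSegs ls
    if isCountyLine l then ([], (l, r.1) :: r.2) else (l :: r.1, r.2)

def extract_from_text_py_alt (text : String) : List (List (String × String)) :=
  let cleaned := (((PySem.Str.split? text "\n").getD []).map PySem.Str.strip).filter (fun s => s ≠ "")
  let p := splitSegs cleaned
  let d0 := buildOffice PySem.Dict.empty p.1
  (if d0.items = [] then [] else [d0.items]) ++
    p.2.map (fun s => (buildOffice (PySem.Dict.insert PySem.Dict.empty "county" s.1) s.2).items)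

-- ===== PRECONDITION & SPEC =====
def Spec_extract_from_text_py (text : String) (out : List (List (String × String))) : Prop := out = extract_from_text_py_alt text
instance (text : String) (out : List (List (String × String))) : Decidable (Spec_extract_from_text_py text out) := by unfold Spec_extract_from_text_py; infer_instance

-- ===== CLAIM (what is proved, stated in full; the proofs are below) =====
def Claim_equal_extract_from_text_py : Prop := ∀ (text : String), Dom_extract_from_text_py text → Spec_extract_from_text_py text (extract_from_text_py text)

-- ===== LEMMAS AND PROOFS =====

-- A's loop body specialised to an already-stripped, non-blank line
def stepC (st : List (List (String × String)) × PySem.Dict String String) (l : String) :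
    List (List (String × String)) × PySem.Dict String String :=
  if isCountyLine l then
    ((if st.2.items = [] then st.1 else st.1 ++ [st.2.items]),
     PySem.Dict.insert PySem.Dict.empty "county" l)
  else (st.1, stepB st.2 l)

def emitD (d : PySem.Dict String String) : List (List (String × String)) :=
  if d.items = [] then [] else [d.items]

lemma anyCounty_eq (l : String) :
    (kenyanCounties.any (fun county => PySem.Str.isIn (PySem.Str.lower county) (PySem.Str.lower l)))
      = isCountyLine l := by
  simp only [isCountyLine, List.any_map]
  rfl

lemma stepA_blank (st : List (List (String × String)) × PySem.Dict String String) (l : String)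
    (hb : PySem.Str.strip l = "") : stepA st l = st := by
  simp [stepA, hb]

lemma stepA_eq_stepC (st : List (List (String × String)) × PySem.Dict String String) (l : String)
    (hb : PySem.Str.strip l ≠ "") : stepA st l = stepC st (PySem.Str.strip l) := by
  simp only [stepA, stepC, stepB]
  rw [anyCounty_eq, if_neg hb]
  split_ifs <;> rfl

lemma items_insert_ne_nil {d : PySem.Dict String String} (k v : String) :
    (PySem.Dict.insert d k v).items ≠ [] := by
  by_cases h : d.contains k
  · rw [PySem.Dict.items_insert_of_contains _ _ h]
    intro hnil
    have hlen : d.items = [] := by simpa using congrArg List.length hnil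
    have hfalse : d.contains k = false := by
      rcases d with ⟨items⟩
      simp only at hlen
      subst hlen
      simp [PySem.Dict.contains]
    simp [hfalse] at h
  · rw [PySem.Dict.items_insert_of_not_contains _ _ (by simpa using h)]
    simp

lemma stepB_ne_nil (d : PySem.Dict String String) (l : String) (h : d.items ≠ []) :
    (stepB d l).items ≠ [] := by
  unfold stepB
  split_ifs <;> first | exact items_insert_ne_nil _ _ | exact h

lemma buildOffice_ne_nil (body : List String) (init : PySem.Dict String String)
    (h : init.items ≠ []) : (buildOffice init body).items ≠ [] := by
  induction body generalizing init with
  | nil => exact h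
  | cons l ls ih => exact ih _ (stepB_ne_nil _ _ h)

-- the core correspondence: A's stateful fold over the cleaned lines equals
-- B's segment-wise construction, for any starting accumulator and current dict
lemma fold_eq_segs (ls : List String)
    (offs : List (List (String × String))) (cur : PySem.Dict String String) :
    (let r := ls.foldl stepC (offs, cur)
     if r.2.items = [] then r.1 else r.1 ++ [r.2.items]) =
    offs ++ emitD (buildOffice cur (splitSegs ls).1) ++
      ((splitSegs ls).2).map
        (fun s => (buildOffice (PySem.Dict.insert PySem.Dict.empty "county" s.1) s.2).items) := by
  induction ls generalizing offs cur with
  | nil =>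
    simp only [List.foldl_nil, splitSegs, buildOffice, emitD, List.map_nil, List.append_nil]
    split_ifs <;> simp
  | cons l ls ih =>
    by_cases hc : isCountyLine l
    · have hstep : stepC (offs, cur) l =
        ((if cur.items = [] then offs else offs ++ [cur.items]),
          PySem.Dict.insert PySem.Dict.empty "county" l) := by
        simp [stepC, hc]
      have hsplit : splitSegs (l :: ls) = ([], (l, (splitSegs ls).1) :: (splitSegs ls).2) := by
        simp [splitSegs, hc]
      rw [List.foldl_cons, hstep, ih, hsplit]
      have hnn := buildOffice_ne_nil (splitSegs ls).1
        (PySem.Dict.insert PySem.Dict.empty "county" l) (items_insert_ne_nil _ _)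
      simp only [List.map_cons]
      rw [show buildOffice cur [] = cur from rfl]
      rw [show emitD (buildOffice (PySem.Dict.insert PySem.Dict.empty "county" l) (splitSegs ls).1)
            = [(buildOffice (PySem.Dict.insert PySem.Dict.empty "county" l) (splitSegs ls).1).items]
          from by simp [emitD, hnn]]
      by_cases hcur : cur.items = [] <;> simp [emitD, hcur]
    · have hstep : stepC (offs, cur) l = (offs, stepB cur l) := by
        simp [stepC, hc]
      have hsplit : splitSegs (l :: ls) = (l :: (splitSegs ls).1, (splitSegs ls).2) := by
        simp [splitSegs, hc]
      rw [List.foldl_cons, hstep, ih, hsplit]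
      rfl

-- stripping/blank-skipping fold over raw lines = stepC fold over the cleaned lines
lemma fold_raw_eq_cleaned (lines : List String)
    (st : List (List (String × String)) × PySem.Dict String String) :
    lines.foldl stepA st =
      ((lines.map PySem.Str.strip).filter (fun s => s ≠ "")).foldl stepC st := by
  induction lines generalizing st with
  | nil => rfl
  | cons l ls ih =>
    by_cases hb : PySem.Str.strip l = ""
    · rw [List.foldl_cons, stepA_blank st l hb]
      simp only [List.map_cons, List.filter_cons, hb]
      simpa using ih st
    · rw [List.foldl_cons, stepA_eq_stepC st l hb]
      simp only [List.map_cons, List.filter_cons]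
      rw [if_pos (by simpa using hb)]
      rw [List.foldl_cons]
      exact ih _

-- ===== VERDICT (by name: the statement is the Claim_ definition above) =====
theorem extract_from_text_py_spec : Claim_equal_extract_from_text_py := by
  intro text _
  unfold Spec_extract_from_text_py
  simp only [extract_from_text_py, extract_from_text_py_alt]
  rw [fold_raw_eq_cleaned]
  rw [fold_eq_segs _ [] PySem.Dict.empty]
  simp [emitD]
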